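-- pv_equiv track=rewrite | github.com/Kukrynitza/AOIS | laba-1/main.py | subtract_binary
-- ===== SOURCE A (Python) =====
-- def subtract_binary(a, b):
--     a = a[:]
--     b = [0] * (len(a) - len(b)) + b
--     borrow = 0
--
--     for i in range(len(a) - 1, -1, -1):
--         a[i] = a[i] - b[i] - borrow
--         if a[i] < 0:
--             a[i] += 2
--             borrow = 1
--         else:
--             borrow = 0
--
--     while len(a) > 1 and a[0] == 0:
--         a.pop(0)
--
--     return a if a else [0]
-- ===== SOURCE B (Python) =====
-- def subtract_binary(a, b):
--     n = len(a)
--     if n == 0: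
--         return [0]
--     b2 = ([0] * (n - len(b)) + b)[:n]
--     e = [x - y for x, y in zip(a, b2)]
--     # Borrow lookahead: the borrow entering position i is 1 exactly when the
--     # nearest nonzero difference to its right is negative.
--     borrows = []
--     sign = 0
--     for d in reversed(e):
--         borrows.append(sign)
--         if d != 0:
--             sign = 1 if d < 0 else 0
--     borrows.reverse()
--     res = [d - br + 2 if d - br < 0 else d - br for d, br in zip(e, borrows)]
--     k = next((i for i, d in enumerate(res) if d != 0), n - 1)
--     return res[k:]
-- ===== Notes on version B (the rewrite author's own statement) =====
-- stated objective: alternative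
-- what changed: Replaces A's single in-place loop that threads the borrow through each subtraction with staged passes: a difference list, a borrow-lookahead pass (borrow into a position = sign of the nearest nonzero difference to its right), a zip/map combining them, and a first-nonzero-index slice instead of repeated pop(0).
import Mathlib
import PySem

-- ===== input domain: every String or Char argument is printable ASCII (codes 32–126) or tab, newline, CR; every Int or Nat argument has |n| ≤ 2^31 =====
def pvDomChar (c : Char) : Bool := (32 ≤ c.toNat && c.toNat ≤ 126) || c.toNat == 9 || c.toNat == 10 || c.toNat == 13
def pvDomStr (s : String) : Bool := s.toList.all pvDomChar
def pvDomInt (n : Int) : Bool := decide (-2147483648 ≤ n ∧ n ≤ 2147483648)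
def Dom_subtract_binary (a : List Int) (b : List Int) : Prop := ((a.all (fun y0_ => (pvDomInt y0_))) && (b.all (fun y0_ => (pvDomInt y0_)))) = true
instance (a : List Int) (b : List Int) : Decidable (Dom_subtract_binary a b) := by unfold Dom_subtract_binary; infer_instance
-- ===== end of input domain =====

-- B replaces A's borrow-threading in-place loop and pop(0) stripping with staged
-- passes: diff list, a borrow-lookahead suffix scan, a zip/map, and a
-- first-nonzero-index slice (alternative decomposition; neither side mutates
-- anything observable here).

-- ===== PORT A =====
-- while len(a) > 1 and a[0] == 0: a.pop(0)
def pvPopLead : List Int → List Int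
  | [] => []
  | [x] => [x]
  | x :: xs => if x = 0 then pvPopLead xs else x :: xs

-- Python `[0] * (len(a) - len(b))` is empty for a negative count; Nat subtraction
-- in `List.replicate` truncates at 0 the same way.  The indices fed to `.set`/`pyGet?`
-- are the in-range values produced by range(len(a)-1, -1, -1), so `.getD 0` and
-- `.toNat` never actually clamp.
def subtract_binary (a : List Int) (b : List Int) : List Int :=
  let b' := List.replicate (a.length - b.length) (0 : Int) ++ b
  let st := (PySem.List.pyRange ((a.length : Int) - 1) (-1) (-1)).foldl
    (fun (s : List Int × Int) i =>
      let d := (PySem.List.pyGet? s.1 i).getD 0 - (PySem.List.pyGet? b' i).getD 0 - s.2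
      let a1 := s.1.set i.toNat d
      if d < 0 then (a1.set i.toNat (d + 2), 1) else (a1, 0))
    (a, 0)
  let res := pvPopLead st.1
  if res ≠ [] then res else [0]

-- ===== PORT B =====
def subtract_binary_alt (a : List Int) (b : List Int) : List Int :=
  let n := a.length
  if n = 0 then [0] else
    let b2 := (List.replicate (n - b.length) (0 : Int) ++ b).take n
    let e := (a.zip b2).map (fun p => p.1 - p.2)
    -- for d in reversed(e): borrows.append(sign); if d != 0: sign = 1 if d < 0 else 0
    let st := e.reverse.foldl
      (fun (s : List Int × Int) d =>
        (s.1 ++ [s.2], if d ≠ 0 then (if d < 0 then (1 : Int) else 0) else s.2))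
      ([], 0)
    let borrows := st.1.reverse
    let res := (e.zip borrows).map
      (fun p => if p.1 - p.2 < 0 then p.1 - p.2 + 2 else p.1 - p.2)
    -- k = next((i for i, d in enumerate(res) if d != 0), n - 1)
    let k := (res.findIdx? (fun d => d ≠ 0)).getD (n - 1)
    res.drop k

-- ===== PRECONDITION & SPEC =====
def Spec_subtract_binary (a : List Int) (b : List Int) (out : List Int) : Prop := out = subtract_binary_alt a b
instance (a : List Int) (b : List Int) (out : List Int) : Decidable (Spec_subtract_binary a b out) := by unfold Spec_subtract_binary; infer_instance

-- ===== CLAIM (what is proved, stated in full; the proofs are below) =====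
def Claim_equal_subtract_binary : Prop := ∀ (a : List Int) (b : List Int), Dom_subtract_binary a b → Spec_subtract_binary a b (subtract_binary a b)

-- ===== LEMMAS AND PROOFS =====

-- Reference characterisation: subtract digit lists of equal length, borrow flowing
-- from the low (right) end; returns (result digits, borrow out of the top digit).
def pvCore : List Int → List Int → List Int × Int
  | x :: xs, y :: ys =>
      let t := pvCore xs ys
      let d := x - y - t.2
      if d < 0 then ((d + 2) :: t.1, 1) else (d :: t.1, 0)
  | _, _ => ([], 0)

-- sign of the first nonzero entry (1 if negative, 0 if positive), default s
def pvSign : List Int → Int → Int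
  | [], s => s
  | d :: ds, s => if d ≠ 0 then (if d < 0 then 1 else 0) else pvSign ds s

-- borrow entering each position: sign of the first nonzero entry to its right
def pvBorrows : List Int → Int → List Int
  | [], _ => []
  | _ :: ds, s => pvSign ds s :: pvBorrows ds s

theorem pvSign01 (e : List Int) (s : Int) (hs : s = 0 ∨ s = 1) :
    pvSign e s = 0 ∨ pvSign e s = 1 := by
  induction e with
  | nil => simpa [pvSign] using hs
  | cons d ds ih =>
    by_cases hd : d = 0
    · simpa [pvSign, hd] using ih
    · by_cases hlt : d < 0 <;> simp [pvSign, hd, hlt]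

-- B's reversed fold computes pvBorrows (reversed) and the final sign.
theorem pvB_fold (e : List Int) (acc : List Int) (s0 : Int) :
    e.reverse.foldl
      (fun (s : List Int × Int) d =>
        (s.1 ++ [s.2], if d ≠ 0 then (if d < 0 then (1 : Int) else 0) else s.2))
      (acc, s0)
    = (acc ++ (pvBorrows e s0).reverse, pvSign e s0) := by
  induction e generalizing acc with
  | nil => simp [pvBorrows, pvSign]
  | cons d ds ih =>
    simp only [List.reverse_cons, List.foldl_append, ih, List.foldl_cons, List.foldl_nil,
      pvBorrows, pvSign, List.reverse_cons]
    by_cases hd : d = 0 <;> simp [hd, List.append_assoc]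

-- pvCore's borrow-out and digits in terms of the difference list and lookahead borrows.
theorem pvCore_char (xs ys : List Int) (h : xs.length = ys.length) :
    (pvCore xs ys).2 = pvSign ((xs.zip ys).map (fun p => p.1 - p.2)) 0 ∧
    (pvCore xs ys).1
      = ((((xs.zip ys).map (fun p => p.1 - p.2)).zip
            (pvBorrows ((xs.zip ys).map (fun p => p.1 - p.2)) 0)).map
          (fun p => if p.1 - p.2 < 0 then p.1 - p.2 + 2 else p.1 - p.2)) := by
  induction xs generalizing ys with
  | nil => cases ys <;> simp_all [pvCore, pvSign]
  | cons x xs ih =>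
    cases ys with
    | nil => simp at h
    | cons y ys =>
      simp only [List.length_cons, Nat.add_right_cancel_iff] at h
      obtain ⟨ih2, ih1⟩ := ih ys h
      have hs01 : (pvCore xs ys).2 = 0 ∨ (pvCore xs ys).2 = 1 := by
        rw [ih2]; exact pvSign01 _ _ (Or.inl rfl)
      constructor
      · have hgoal : (pvCore (x :: xs) (y :: ys)).2
            = if x - y - (pvCore xs ys).2 < 0 then 1 else 0 := by
          simp only [pvCore]; split <;> rfl
        rw [hgoal]
        simp only [List.zip_cons_cons, List.map_cons, pvSign, ← ih2]
        rcases hs01 with h | h <;> rw [h] <;> split_ifs <;> omega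
      · simp only [pvCore, List.zip_cons_cons, List.map_cons, pvBorrows]
        rw [← ih2, ← ih1]
        by_cases hlt : x - y - (pvCore xs ys).2 < 0 <;> simp [hlt]

theorem pvCore_length (xs ys : List Int) (h : xs.length = ys.length) :
    (pvCore xs ys).1.length = xs.length := by
  induction xs generalizing ys with
  | nil => cases ys <;> simp [pvCore]
  | cons x xs ih =>
    cases ys with
    | nil => simp at h
    | cons y ys =>
      simp only [List.length_cons, Nat.add_right_cancel_iff] at h
      simp only [pvCore]
      split <;> simp [ih ys h]

theorem pvPopLead_ne_nil (l : List Int) (h : l ≠ []) : pvPopLead l ≠ [] := by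
  induction l with
  | nil => simp at h
  | cons x xs ih =>
    cases xs with
    | nil => simp [pvPopLead]
    | cons y ys =>
      simp only [pvPopLead]
      split
      · exact ih (by simp)
      · simp

-- B's first-nonzero slice equals A's leading-zero stripping.
theorem pvStrip_eq (l : List Int) (h : l ≠ []) :
    l.drop ((l.findIdx? (fun d => d ≠ 0)).getD (l.length - 1)) = pvPopLead l := by
  induction l with
  | nil => simp at h
  | cons x xs ih =>
    cases xs with
    | nil =>
      rw [List.findIdx?_cons]
      by_cases hx : x = 0
      · subst hx; rw [if_neg (by simp)]; simp [List.findIdx?_nil, pvPopLead]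
      · rw [if_pos (by simp [hx])]; simp [pvPopLead]
    | cons y ys =>
      by_cases hx : x = 0
      · subst hx
        rw [List.findIdx?_cons, if_neg (by simp)]
        have ihr := ih (by simp)
        have hpl : pvPopLead ((0 : Int) :: y :: ys) = pvPopLead (y :: ys) := by
          simp [pvPopLead]
        rw [hpl]
        cases hfi : (y :: ys).findIdx? (fun d => decide (d ≠ 0)) with
        | some k =>
          rw [hfi] at ihr
          simpa using ihr
        | none =>
          rw [hfi] at ihr
          simp only [Option.getD_none] at ihr
          simp only [Option.map_none, Option.getD_none]
          have hl : ((0 : Int) :: y :: ys).length - 1 = ((y :: ys).length - 1) + 1 := by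
            simp
          rw [hl, List.drop_succ_cons]
          exact ihr
      · rw [List.findIdx?_cons, if_pos (by simp [hx])]
        simp [pvPopLead, hx]

-- A's index loop, processed from index n-1 down to n-j, rewrites the suffix from
-- n-j to the pvCore digits of the suffixes and leaves the prefix untouched.
theorem pvA_loop (a c : List Int) (hc : a.length ≤ c.length)
    (j : Nat) (hj : j ≤ a.length) :
    ((PySem.List.pyRange ((a.length : Int) - 1) (((a.length - j : Nat) : Int) - 1) (-1)).foldl
      (fun (s : List Int × Int) i =>
        let d := (PySem.List.pyGet? s.1 i).getD 0 - (PySem.List.pyGet? c i).getD 0 - s.2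
        let a1 := s.1.set i.toNat d
        if d < 0 then (a1.set i.toNat (d + 2), 1) else (a1, 0))
      (a, 0))
    = (a.take (a.length - j)
        ++ (pvCore (a.drop (a.length - j)) ((c.take a.length).drop (a.length - j))).1,
       (pvCore (a.drop (a.length - j)) ((c.take a.length).drop (a.length - j))).2) := by
  induction j with
  | zero =>
    rw [PySem.List.pyRange_neg_one_eq_nil (by omega)]
    simp [pvCore]
  | succ j ih =>
    have hj' : j ≤ a.length := by omega
    set n := a.length with hn
    set k : Nat := n - (j + 1) with hk
    have hkn : k < n := by omega
    have hsplit : PySem.List.pyRange ((n : Int) - 1) ((k : Int) - 1) (-1)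
        = PySem.List.pyRange ((n : Int) - 1) (((n - j : Nat) : Int) - 1) (-1) ++ [(k : Int)] := by
      rw [PySem.List.pyRange_neg_one_eq_reverse, PySem.List.pyRange_neg_one_eq_reverse]
      have h1 : ((k : Int) - 1) + 1 = (k : Int) := by ring
      have h2 : (((n - j : Nat) : Int) - 1) + 1 = ((n - j : Nat) : Int) := by ring
      rw [h1, h2]
      have h3 : ((n : Int) - 1) + 1 = (n : Int) := by ring
      rw [h3]
      have h4 : PySem.List.pyRange (k : Int) (n : Int) 1
          = (k : Int) :: PySem.List.pyRange ((k : Int) + 1) (n : Int) 1 :=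
        PySem.List.pyRange_one_cons (by exact_mod_cast hkn)
      have h5 : ((k : Int) + 1) = ((n - j : Nat) : Int) := by omega
      rw [h4, h5, List.reverse_cons]
    have hcast : ((a.length - (j + 1) : Nat) : Int) - 1 = (k : Int) - 1 := by
      rw [hk, hn]
    rw [hcast, hsplit, List.foldl_append, ih hj']
    have hnj : n - j = k + 1 := by omega
    simp only [List.foldl_cons, List.foldl_nil, hnj]
    have hklt : k < (c.take n).length := by simp; omega
    have hget_a : (PySem.List.pyGet?
        (a.take (k + 1) ++ (pvCore (a.drop (k + 1)) ((c.take n).drop (k + 1))).1) (k : Int)).getD 0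
        = a[k]'(by omega) := by
      rw [PySem.List.pyGet?_natCast]
      rw [List.getElem?_append_left (by simp; omega)]
      rw [List.getElem?_take_of_lt (by omega)]
      simp [List.getElem?_eq_getElem (by omega : k < a.length)]
    have hget_c : (PySem.List.pyGet? c (k : Int)).getD 0 = (c.take n)[k]'hklt := by
      rw [PySem.List.pyGet?_natCast]
      rw [List.getElem_take]
      simp [List.getElem?_eq_getElem (by omega : k < c.length)]
    have htake : a.take (k + 1) = a.take k ++ [a[k]'(by omega)] := by
      rw [List.take_add_one]
      simp [List.getElem?_eq_getElem (by omega : k < a.length)]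
    have hset : ∀ v : Int, ∀ t : List Int,
        (a.take (k + 1) ++ t).set k v = a.take k ++ v :: t := by
      intro v t
      rw [htake, List.append_assoc, List.set_append]
      have hm : min k a.length = k := Nat.min_eq_left (by omega)
      simp [List.length_take, hm]
    have hdropa : a.drop k = a[k]'(by omega) :: a.drop (k + 1) :=
      List.drop_eq_getElem_cons (by omega)
    have hdropc : (c.take n).drop k = (c.take n)[k]'hklt :: (c.take n).drop (k + 1) :=
      List.drop_eq_getElem_cons hklt
    simp only [hget_a, hget_c, Int.toNat_natCast, hset, hdropa, hdropc, pvCore]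
    split <;> simp_all

-- ===== VERDICT (by name: the statement is the Claim_ definition above) =====
theorem subtract_binary_spec : Claim_equal_subtract_binary := by
  intro a b _
  unfold Spec_subtract_binary subtract_binary subtract_binary_alt
  dsimp only
  by_cases ha : a = []
  · subst ha
    simp [PySem.List.pyRange_neg_one_eq_nil, pvPopLead]
  · have hne : a.length ≠ 0 := by simpa using ha
    rw [if_neg hne]
    set c := List.replicate (a.length - b.length) (0 : Int) ++ b with hcdef
    have hble : a.length ≤ c.length := by simp [hcdef]; omega
    set b2 := c.take a.length with hb2
    have hlen2 : b2.length = a.length := by simp [hb2, hcdef]; omega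
    have hA := pvA_loop a c hble a.length le_rfl
    simp only [Nat.sub_self, Nat.cast_zero, zero_sub, List.take_zero, List.drop_zero,
      List.nil_append] at hA
    rw [hA]
    set e := (a.zip b2).map (fun p => p.1 - p.2) with he
    rw [pvB_fold e [] 0]
    simp only [List.nil_append, List.reverse_reverse]
    obtain ⟨_, hdig⟩ := pvCore_char a b2 hlen2.symm
    rw [← he] at hdig
    rw [← hdig]
    have hLcore : (pvCore a b2).1.length = a.length := pvCore_length a b2 hlen2.symm
    have hLne : (pvCore a b2).1 ≠ [] := by
      intro h; rw [h] at hLcore; exact ha (List.length_eq_zero_iff.mp hLcore.symm)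
    have hstrip := pvStrip_eq (pvCore a b2).1 hLne
    rw [hLcore] at hstrip
    rw [hstrip]
    have hPne := pvPopLead_ne_nil _ hLne
    rw [← hb2]
    simp [hPne]
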